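-- pv_equiv track=rewrite | github.com/mattg07/fastapi-school | services/act_sat_conversion.py | sat_to_act
-- ===== SOURCE A (Python) =====
-- def sat_to_act(sat_score):
--     """
--     Convert an SAT Total score to an equivalent ACT Composite score.
--
--     Args:
--         sat_score (int): SAT Total score (400-1600)
--
--     Returns:
--         int: Equivalent ACT Composite score (1-36)
--         None: If the input is None or invalid
--     """
--     if sat_score is None:
--         return None
--
--     # Convert to int first to handle potential string inputs
--     try:
--         sat_score = int(sat_score)
--     except (ValueError, TypeError):
--         return None
--
--     # Ensure the score is within valid SAT range
--     if sat_score < 400 or sat_score > 1600: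
--         return None
--
--     # SAT score ranges and their corresponding ACT scores
--     sat_ranges = [
--         (1570, 1600, 36),
--         (1530, 1560, 35),
--         (1490, 1520, 34),
--         (1450, 1480, 33),
--         (1420, 1440, 32),
--         (1390, 1410, 31),
--         (1360, 1380, 30),
--         (1330, 1350, 29),
--         (1300, 1320, 28),
--         (1260, 1290, 27),
--         (1230, 1250, 26),
--         (1200, 1220, 25),
--         (1160, 1190, 24),
--         (1130, 1150, 23),
--         (1100, 1120, 22),
--         (1060, 1090, 21),
--         (1030, 1050, 20),
--         (990, 1020, 19),
--         (960, 980, 18),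
--         (920, 950, 17),
--         (880, 910, 16),
--         (830, 870, 15),
--         (780, 820, 14),
--         (730, 770, 13),
--         (690, 720, 12),
--         (650, 680, 11),
--         (620, 640, 10),
--         (590, 610, 9),
--         (400, 580, 8)  # Simplifying the lower ranges
--     ]
--
--     for low, high, act in sat_ranges:
--         if low <= sat_score <= high:
--             return act
--
--     # Default fallback (should not reach here given the input validation)
--     return None
-- ===== SOURCE B (Python) =====
-- # Same validation as the original, but the linear scan over the 29 ranges is
-- # replaced by a binary search over the low boundaries (ascending), with an
-- # explicit high-bound check to reproduce the None "gap" behaviour.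
--
-- _TABLE = [
--     (400, 580, 8), (590, 610, 9), (620, 640, 10), (650, 680, 11),
--     (690, 720, 12), (730, 770, 13), (780, 820, 14), (830, 870, 15),
--     (880, 910, 16), (920, 950, 17), (960, 980, 18), (990, 1020, 19),
--     (1030, 1050, 20), (1060, 1090, 21), (1100, 1120, 22), (1130, 1150, 23),
--     (1160, 1190, 24), (1200, 1220, 25), (1230, 1250, 26), (1260, 1290, 27),
--     (1300, 1320, 28), (1330, 1350, 29), (1360, 1380, 30), (1390, 1410, 31),
--     (1420, 1440, 32), (1450, 1480, 33), (1490, 1520, 34), (1530, 1560, 35),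
--     (1570, 1600, 36),
-- ]
-- _LOWS = [t[0] for t in _TABLE]
-- _HIGHS = [t[1] for t in _TABLE]
-- _ACTS = [t[2] for t in _TABLE]
--
--
-- def sat_to_act(sat_score):
--     if sat_score is None:
--         return None
--     try:
--         sat_score = int(sat_score)
--     except (ValueError, TypeError):
--         return None
--     if sat_score < 400 or sat_score > 1600:
--         return None
--     # binary search: rightmost index i with _LOWS[i] <= sat_score
--     lo, hi = 0, len(_LOWS)
--     while lo < hi:
--         mid = (lo + hi) // 2
--         if _LOWS[mid] <= sat_score:
--             lo = mid + 1
--         else: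
--             hi = mid
--     i = lo - 1  # lo >= 1 since sat_score >= 400 == _LOWS[0]
--     return _ACTS[i] if sat_score <= _HIGHS[i] else None
-- ===== Notes on version B (the rewrite author's own statement) =====
-- stated objective: alternative
-- what changed: The linear first-match scan over the 29 SAT ranges is replaced by a binary search over the ascending low boundaries plus an explicit high-bound check (reproducing the None gaps); validation is unchanged.
import Mathlib
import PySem

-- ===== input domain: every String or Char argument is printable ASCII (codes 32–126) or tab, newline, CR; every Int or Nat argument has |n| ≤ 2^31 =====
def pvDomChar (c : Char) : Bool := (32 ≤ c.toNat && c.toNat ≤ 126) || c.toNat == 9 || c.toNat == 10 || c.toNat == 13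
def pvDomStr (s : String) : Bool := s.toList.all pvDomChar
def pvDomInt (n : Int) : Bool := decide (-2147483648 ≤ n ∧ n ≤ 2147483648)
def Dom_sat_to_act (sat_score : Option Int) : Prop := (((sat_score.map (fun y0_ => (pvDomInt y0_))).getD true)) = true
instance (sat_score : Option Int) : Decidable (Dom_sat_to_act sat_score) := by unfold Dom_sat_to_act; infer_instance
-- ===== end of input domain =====

-- B replaces A's linear first-match scan of the range table with a binary search
-- over the ascending low boundaries plus an explicit high-bound check (objective: alternative).

-- ===== PORT A =====
-- A's table, in A's (descending) order
def satRangesA : List (Int × Int × Int) :=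
  [(1570, 1600, 36), (1530, 1560, 35), (1490, 1520, 34), (1450, 1480, 33),
   (1420, 1440, 32), (1390, 1410, 31), (1360, 1380, 30), (1330, 1350, 29),
   (1300, 1320, 28), (1260, 1290, 27), (1230, 1250, 26), (1200, 1220, 25),
   (1160, 1190, 24), (1130, 1150, 23), (1100, 1120, 22), (1060, 1090, 21),
   (1030, 1050, 20), (990, 1020, 19), (960, 980, 18), (920, 950, 17),
   (880, 910, 16), (830, 870, 15), (780, 820, 14), (730, 770, 13),
   (690, 720, 12), (650, 680, 11), (620, 640, 10), (590, 610, 9),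
   (400, 580, 8)]

-- the 'for low, high, act in sat_ranges' loop: first matching range wins
def scanRangesA (n : Int) : List (Int × Int × Int) → Option Int
  | [] => none
  | (low, high, act) :: rest =>
      if low ≤ n ∧ n ≤ high then some act else scanRangesA n rest

def sat_to_act (sat_score : Option Int) : Option Int :=
  match sat_score with
  | none => none                                     -- sat_score is None
  | some n =>                                        -- int(sat_score) is the identity on an int
      if n < 400 ∨ n > 1600 then none
      else scanRangesA n satRangesA

-- ===== PORT B =====
def lowsB : List Int :=
  [400, 590, 620, 650, 690, 730, 780, 830, 880, 920, 960, 990, 1030, 1060,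
   1100, 1130, 1160, 1200, 1230, 1260, 1300, 1330, 1360, 1390, 1420, 1450,
   1490, 1530, 1570]
def highsB : List Int :=
  [580, 610, 640, 680, 720, 770, 820, 870, 910, 950, 980, 1020, 1050, 1090,
   1120, 1150, 1190, 1220, 1250, 1290, 1320, 1350, 1380, 1410, 1440, 1480,
   1520, 1560, 1600]
def actsB : List Int :=
  [8, 9, 10, 11, 12, 13, 14, 15, 16, 17, 18, 19, 20, 21, 22, 23, 24, 25, 26,
   27, 28, 29, 30, 31, 32, 33, 34, 35, 36]

-- the 'while lo < hi' binary-search loop; _LOWS[mid] via getD is exact since 0 ≤ mid < hi ≤ len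
-- fuel = len(_LOWS) bounds the iteration count (hi - lo shrinks each step); the loop body is unchanged
def bsLoopB (x : Int) : Nat → Nat → Nat → Nat
  | 0, lo, _ => lo
  | fuel + 1, lo, hi =>
      if lo < hi then
        let mid := (lo + hi) / 2
        if lowsB.getD mid 0 ≤ x then bsLoopB x fuel (mid + 1) hi else bsLoopB x fuel lo mid
      else lo

def sat_to_act_alt (sat_score : Option Int) : Option Int :=
  match sat_score with
  | none => none
  | some n =>                                        -- int(sat_score) is the identity on an int
      if n < 400 ∨ n > 1600 then none
      else
        let lo := bsLoopB n lowsB.length 0 lowsB.length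
        let i := lo - 1                              -- lo ≥ 1 since n ≥ 400 = _LOWS[0], so Nat subtraction is exact
        if n ≤ highsB.getD i 0 then some (actsB.getD i 0) else none

-- ===== PRECONDITION & SPEC =====
def Spec_sat_to_act (sat_score : Option Int) (out : Option Int) : Prop := out = sat_to_act_alt sat_score
instance (sat_score : Option Int) (out : Option Int) : Decidable (Spec_sat_to_act sat_score out) := by unfold Spec_sat_to_act; infer_instance

-- ===== CLAIM (what is proved, stated in full; the proofs are below) =====
def Claim_equal_sat_to_act : Prop := ∀ (sat_score : Option Int), Dom_sat_to_act sat_score → Spec_sat_to_act sat_score (sat_to_act sat_score)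

-- ===== LEMMAS AND PROOFS =====
set_option maxRecDepth 100000 in
-- on every in-range score the two ports agree (finite check, 1201 cases)
theorem inRange_agree : ∀ k ∈ Finset.range 1201,
    sat_to_act (some (400 + (k : Int))) = sat_to_act_alt (some (400 + (k : Int))) := by
  decide

-- ===== VERDICT (by name: the statement is the Claim_ definition above) =====
theorem sat_to_act_spec : Claim_equal_sat_to_act := by
  intro s _
  unfold Spec_sat_to_act
  match s with
  | none => rfl
  | some n =>
      by_cases h : n < 400 ∨ n > 1600
      · simp [sat_to_act, sat_to_act_alt, h]
      · have h4 : 400 ≤ n := by omega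
        have h6 : n ≤ 1600 := by omega
        have hk : ∃ k : ℕ, k < 1201 ∧ n = 400 + (k : Int) := by
          refine ⟨(n - 400).toNat, by omega, by omega⟩
        obtain ⟨k, hk1, hk2⟩ := hk
        have := inRange_agree k (Finset.mem_range.mpr hk1)
        rw [hk2]
        exact this
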